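-- pv_equiv track=rewrite | github.com/miaow2/netbox-config-diff | netbox_config_diff/compliance/sros.py | _indented_to_braces
-- ===== SOURCE A (Python) =====
-- INDENT = "    "
--
-- def _indented_to_braces(text: str) -> str:
--     """Convert indentation-based remediation output to MD-CLI brace format.
--
--     Input (from hier_config remediation):
--         configure
--           router "Base"
--             delete interface "old-if"
--             bgp
--               connect-retry 90
--             interface "new-if"
--               admin-state enable
--
--     Output:
--         configure {
--             router "Base" {
--                 delete {
--                     interface "old-if"
--                 }
--                 bgp {
--                     connect-retry 90
--                 }
--                 interface "new-if" {
--                     admin-state enable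
--                 }
--             }
--         }
--
--     The algorithm determines which lines are containers (have children at a deeper
--     indentation level) and which are leaves (no children), then emits braces accordingly.
--     """
--     input_lines = text.splitlines()
--     if not input_lines:
--         return ""
--
--     # Parse lines into (indent_level, text) tuples
--     parsed = []
--     for line in input_lines:
--         if not line.strip():
--             continue
--         indent = len(line) - len(line.lstrip())
--         parsed.append((indent, line.strip()))
--
--     if not parsed:
--         return ""
--
--     output_lines = []
--     indent_stack = []  # Stack of indent levels for open braces
--
--     for i, (indent, line_text) in enumerate(parsed):
--         # Close any open braces for sections that are at or deeper than current indent
--         while indent_stack and indent_stack[-1] >= indent: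
--             indent_stack.pop()
--             output_lines.append(INDENT * len(indent_stack) + "}")
--
--         # Determine if this line is a container (has children at deeper indent)
--         is_container = False
--         if i + 1 < len(parsed):
--             next_indent = parsed[i + 1][0]
--             if next_indent > indent:
--                 is_container = True
--
--         if is_container:
--             output_lines.append(INDENT * len(indent_stack) + line_text + " {")
--             indent_stack.append(indent)
--         else:
--             output_lines.append(INDENT * len(indent_stack) + line_text)
--
--     # Close remaining open braces
--     while indent_stack:
--         indent_stack.pop()
--         output_lines.append(INDENT * len(indent_stack) + "}")
--
--     return "\n".join(output_lines)
-- ===== SOURCE B (Python) =====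
-- INDENT = "    "
--
-- def _indented_to_braces(text: str) -> str:
--     parsed = [(len(l) - len(l.lstrip()), l.strip())
--               for l in text.splitlines() if l.strip()]
--
--     def emit(lines, depth):
--         out = []
--         i = 0
--         while i < len(lines):
--             ind, t = lines[i]
--             j = i + 1
--             while j < len(lines) and lines[j][0] > ind:
--                 j += 1
--             if j > i + 1:
--                 out.append(INDENT * depth + t + " {")
--                 out.extend(emit(lines[i + 1:j], depth + 1))
--                 out.append(INDENT * depth + "}")
--             else:
--                 out.append(INDENT * depth + t)
--             i = j
--         return out
--
--     return "\n".join(emit(parsed, 0))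
-- ===== Notes on version B (the rewrite author's own statement) =====
-- stated objective: alternative
-- what changed: Replaces A's linear scan with an explicit indent stack and lazy brace-closing by a recursive descent over the indentation tree: each node takes the run of strictly deeper following lines as its children, recurses at depth+1 and closes its brace eagerly.
import Mathlib
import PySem

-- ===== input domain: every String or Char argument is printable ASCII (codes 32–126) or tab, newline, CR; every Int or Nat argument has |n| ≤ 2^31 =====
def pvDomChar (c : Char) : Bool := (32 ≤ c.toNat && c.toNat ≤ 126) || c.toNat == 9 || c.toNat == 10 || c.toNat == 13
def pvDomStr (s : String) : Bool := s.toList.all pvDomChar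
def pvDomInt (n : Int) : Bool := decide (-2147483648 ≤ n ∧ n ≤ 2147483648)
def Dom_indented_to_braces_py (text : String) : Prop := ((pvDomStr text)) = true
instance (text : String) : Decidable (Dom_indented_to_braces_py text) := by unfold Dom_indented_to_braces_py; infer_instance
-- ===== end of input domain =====

-- B re-implements A's stack-based brace conversion as a recursive descent over the
-- indentation tree (alternative decomposition, same cost); return values proved equal.

-- INDENT * n (Python string repetition)
def pvIndent (n : Nat) : String := PySem.Str.join "" (List.replicate n "    ")

-- ===== PORT A =====
-- A's parsing loop: skip blank lines, record (indent width, stripped text)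
def pvParseA (lines : List String) : List (Int × String) :=
  match lines with
  | [] => []
  | l :: rest =>
    if PySem.Str.strip l = "" then pvParseA rest
    else (PySem.Str.len l - PySem.Str.len (PySem.Str.lstrip l), PySem.Str.strip l) :: pvParseA rest

-- A's trailing 'while indent_stack:' loop (stack top at the head)
def pvCloseA (stack : List Int) : List String :=
  match stack with
  | [] => []
  | _ :: srest => (pvIndent srest.length ++ "}") :: pvCloseA srest

-- A's main 'for i, (indent, line_text) in enumerate(parsed)' loop with its inner
-- 'while indent_stack and indent_stack[-1] >= indent' pop loop; is_container looks
-- one element ahead (head of rest).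
def pvLoopA (parsed : List (Int × String)) (stack : List Int) : List String :=
  match parsed, stack with
  | [], _ => pvCloseA stack
  | (ind, t) :: rest, top :: srest =>
    if ind ≤ top then
      (pvIndent srest.length ++ "}") :: pvLoopA ((ind, t) :: rest) srest
    else
      if (match rest with | (ni, _) :: _ => decide (ind < ni) | [] => false) then
        (pvIndent (top :: srest).length ++ t ++ " {") :: pvLoopA rest (ind :: top :: srest)
      else
        (pvIndent (top :: srest).length ++ t) :: pvLoopA rest (top :: srest)
  | (ind, t) :: rest, [] =>
      if (match rest with | (ni, _) :: _ => decide (ind < ni) | [] => false) then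
        (pvIndent 0 ++ t ++ " {") :: pvLoopA rest [ind]
      else
        (pvIndent 0 ++ t) :: pvLoopA rest []
termination_by (parsed.length, stack.length)

def indented_to_braces_py (text : String) : String :=
  let input_lines := PySem.Str.splitlines text
  if input_lines.isEmpty then ""
  else
    let parsed := pvParseA input_lines
    if parsed.isEmpty then ""
    else PySem.Str.join "\n" (pvLoopA parsed [])

-- ===== PORT B =====
-- B's recursive emit: the children of a line are the run of strictly deeper
-- following lines (the inner 'while j' scan = takeWhile/dropWhile).
def pvEmitB (lines : List (Int × String)) (depth : Nat) : List String :=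
  match lines with
  | [] => []
  | (ind, t) :: rest =>
    let run := rest.takeWhile (fun p => decide (ind < p.1))
    let rest' := rest.dropWhile (fun p => decide (ind < p.1))
    if run.isEmpty then
      (pvIndent depth ++ t) :: pvEmitB rest' depth
    else
      (pvIndent depth ++ t ++ " {") ::
        (pvEmitB run (depth + 1) ++ ((pvIndent depth ++ "}") :: pvEmitB rest' depth))
termination_by lines.length
decreasing_by
  · exact Nat.lt_succ_of_le (rest.length_dropWhile_le _)
  · exact Nat.lt_succ_of_le (rest.takeWhile_sublist _).length_le
  · exact Nat.lt_succ_of_le (rest.length_dropWhile_le _)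

def indented_to_braces_py_alt (text : String) : String :=
  let parsed := (PySem.Str.splitlines text).filterMap (fun l =>
    if PySem.Str.strip l = "" then none
    else some (PySem.Str.len l - PySem.Str.len (PySem.Str.lstrip l), PySem.Str.strip l))
  PySem.Str.join "\n" (pvEmitB parsed 0)

-- ===== PRECONDITION & SPEC =====
def Spec_indented_to_braces_py (text : String) (out : String) : Prop := out = indented_to_braces_py_alt text
instance (text : String) (out : String) : Decidable (Spec_indented_to_braces_py text out) := by unfold Spec_indented_to_braces_py; infer_instance

-- ===== CLAIM (what is proved, stated in full; the proofs are below) =====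
def Claim_equal_indented_to_braces_py : Prop := ∀ (text : String), Dom_indented_to_braces_py text → Spec_indented_to_braces_py text (indented_to_braces_py text)

-- ===== LEMMAS AND PROOFS =====

theorem pvLoopA_nil (stack : List Int) : pvLoopA [] stack = pvCloseA stack := by
  rw [pvLoopA.eq_def]

theorem pvLoopA_cons_nil (ind : Int) (t : String) (rest : List (Int × String)) :
    pvLoopA ((ind, t) :: rest) []
      = if (match rest with | (ni, _) :: _ => decide (ind < ni) | [] => false) then
          (pvIndent 0 ++ t ++ " {") :: pvLoopA rest [ind]
        else
          (pvIndent 0 ++ t) :: pvLoopA rest [] := by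
  rw [pvLoopA.eq_def]

theorem pvLoopA_cons_cons (ind : Int) (t : String) (rest : List (Int × String))
    (top : Int) (srest : List Int) :
    pvLoopA ((ind, t) :: rest) (top :: srest)
      = if ind ≤ top then
          (pvIndent srest.length ++ "}") :: pvLoopA ((ind, t) :: rest) srest
        else
          if (match rest with | (ni, _) :: _ => decide (ind < ni) | [] => false) then
            (pvIndent (top :: srest).length ++ t ++ " {") :: pvLoopA rest (ind :: top :: srest)
          else
            (pvIndent (top :: srest).length ++ t) :: pvLoopA rest (top :: srest) := by
  rw [pvLoopA.eq_def]

theorem pvEmitB_nil (depth : Nat) : pvEmitB [] depth = [] := by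
  rw [pvEmitB.eq_def]

theorem pvEmitB_cons (ind : Int) (t : String) (rest : List (Int × String)) (depth : Nat) :
    pvEmitB ((ind, t) :: rest) depth
      = if (rest.takeWhile (fun p => decide (ind < p.1))).isEmpty then
          (pvIndent depth ++ t) :: pvEmitB (rest.dropWhile (fun p => decide (ind < p.1))) depth
        else
          (pvIndent depth ++ t ++ " {") ::
            (pvEmitB (rest.takeWhile (fun p => decide (ind < p.1))) (depth + 1)
              ++ ((pvIndent depth ++ "}") :: pvEmitB (rest.dropWhile (fun p => decide (ind < p.1))) depth)) := by
  rw [pvEmitB.eq_def]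

theorem pvParseA_eq_filterMap (lines : List String) :
    pvParseA lines = lines.filterMap (fun l =>
      if PySem.Str.strip l = "" then none
      else some (PySem.Str.len l - PySem.Str.len (PySem.Str.lstrip l), PySem.Str.strip l)) := by
  induction lines with
  | nil => rfl
  | cons l rest ih =>
    unfold pvParseA
    by_cases h : PySem.Str.strip l = "" <;> simp [h, ih]

-- One pop step of A's while loop.
theorem pvLoopA_pop (ind : Int) (t : String) (rest : List (Int × String))
    (top : Int) (srest : List Int) (h : ind ≤ top) :
    pvLoopA ((ind, t) :: rest) (top :: srest)
      = (pvIndent srest.length ++ "}") :: pvLoopA ((ind, t) :: rest) srest := by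
  rw [pvLoopA_cons_cons]
  simp [h]

-- Key lemma: processing a block l₁ of lines all strictly deeper than the open
-- container 'ind' (followed by l₂ whose first line, if any, is at most 'ind')
-- emits B's recursive rendering of l₁ one level deeper, then closes 'ind'.
theorem pvLemS (ind : Int) (l₁ l₂ : List (Int × String)) (s : List Int)
    (h1 : ∀ p ∈ l₁, ind < p.1)
    (h2 : ∀ p ∈ l₂.head?, p.1 ≤ ind) :
    pvLoopA (l₁ ++ l₂) (ind :: s)
      = pvEmitB l₁ (s.length + 1) ++ ((pvIndent s.length ++ "}") :: pvLoopA l₂ s) := by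
  match l₁ with
  | [] =>
    simp only [List.nil_append, pvEmitB, List.nil_append]
    match l₂ with
    | [] => rw [pvLoopA_nil, pvCloseA, pvLoopA_nil]
    | (h, u) :: r =>
      have hle : h ≤ ind := h2 (h, u) (by simp)
      exact pvLoopA_pop h u r ind s hle
  | (h₁, t₁) :: r₁ =>
    have hlt : ind < h₁ := h1 (h₁, t₁) (by simp)
    have hrun : ∀ p ∈ r₁.takeWhile (fun p => decide (h₁ < p.1)), h₁ < p.1 := by
      intro p hp
      have := List.mem_takeWhile_imp hp
      simpa using this
    have hrest' : ∀ p ∈ (r₁.dropWhile (fun p => decide (h₁ < p.1)) ++ l₂).head?, p.1 ≤ h₁ := by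
      intro p hp
      cases hd : r₁.dropWhile (fun p => decide (h₁ < p.1)) with
      | nil =>
        simp [hd] at hp
        have := h2 p hp
        omega
      | cons q qr =>
        have hq : ¬ (h₁ < q.1) := by
          have := List.head?_dropWhile_not (fun p => decide (h₁ < p.1)) r₁
          rw [hd] at this
          simpa using this
        simp [hd] at hp
        subst hp; omega
    have hr1 : ∀ p ∈ r₁, ind < p.1 := fun p hp => h1 p (by simp [hp])
    have hcont : (match r₁ ++ l₂ with | (ni, _) :: _ => decide (h₁ < ni) | [] => false)
        = !(r₁.takeWhile (fun p => decide (h₁ < p.1))).isEmpty := by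
      cases r₁ with
      | nil =>
        cases l₂ with
        | nil => simp
        | cons q qr =>
          have := h2 q (by simp)
          simp only [List.nil_append, List.takeWhile_nil, List.isEmpty_nil, Bool.not_true]
          obtain ⟨q1, q2⟩ := q
          simp at this ⊢
          omega
      | cons q qr =>
        obtain ⟨q1, q2⟩ := q
        by_cases hq : h₁ < q1 <;> simp [hq]
    rw [List.cons_append, pvLoopA_cons_cons]
    cases s with
    | nil =>
      simp only [show ¬ (h₁ ≤ ind) by omega, if_false, hcont]
      by_cases hrunE : (r₁.takeWhile (fun p => decide (h₁ < p.1))).isEmpty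
      · -- leaf
        have hdrop : r₁.dropWhile (fun p => decide (h₁ < p.1)) = r₁ := by
          cases r₁ with
          | nil => rfl
          | cons q qr =>
            obtain ⟨q1, q2⟩ := q
            rw [List.dropWhile_cons]
            by_cases hq : h₁ < q1
            · simp [hq] at hrunE
            · simp [hq]
        have ih := pvLemS ind r₁ l₂ [] hr1 h2
        rw [hrunE]
        simp only [Bool.not_true, ih]
        rw [pvEmitB]
        simp [hrunE, hdrop]
      · -- container
        rw [show (r₁.takeWhile (fun p => decide (h₁ < p.1))).isEmpty = false by
              simpa using hrunE]
        simp only [Bool.not_false, if_true]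
        have hsplit : r₁ ++ l₂ = r₁.takeWhile (fun p => decide (h₁ < p.1))
            ++ (r₁.dropWhile (fun p => decide (h₁ < p.1)) ++ l₂) := by
          rw [← List.append_assoc, List.takeWhile_append_dropWhile]
        rw [hsplit]
        have ih1 := pvLemS h₁ (r₁.takeWhile (fun p => decide (h₁ < p.1)))
            (r₁.dropWhile (fun p => decide (h₁ < p.1)) ++ l₂) [ind] hrun hrest'
        rw [ih1]
        have hr' : ∀ p ∈ r₁.dropWhile (fun p => decide (h₁ < p.1)), ind < p.1 := by
          intro p hp
          exact hr1 p (List.dropWhile_sublist _ |>.mem hp)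
        have ih2 := pvLemS ind (r₁.dropWhile (fun p => decide (h₁ < p.1))) l₂ [] hr' h2
        rw [ih2]
        rw [pvEmitB]
        simp only [show (r₁.takeWhile (fun p => decide (h₁ < p.1))).isEmpty = false by
              simpa using hrunE]
        simp
    | cons top srest =>
      simp only [show ¬ (h₁ ≤ ind) by omega, if_false, hcont]
      by_cases hrunE : (r₁.takeWhile (fun p => decide (h₁ < p.1))).isEmpty
      · have hdrop : r₁.dropWhile (fun p => decide (h₁ < p.1)) = r₁ := by
          cases r₁ with
          | nil => rfl
          | cons q qr =>
            obtain ⟨q1, q2⟩ := q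
            rw [List.dropWhile_cons]
            by_cases hq : h₁ < q1
            · simp [hq] at hrunE
            · simp [hq]
        have ih := pvLemS ind r₁ l₂ (top :: srest) hr1 h2
        rw [hrunE]
        simp only [Bool.not_true, ih]
        rw [pvEmitB]
        simp [hrunE, hdrop]
      · rw [show (r₁.takeWhile (fun p => decide (h₁ < p.1))).isEmpty = false by
              simpa using hrunE]
        simp only [Bool.not_false, if_true]
        have hsplit : r₁ ++ l₂ = r₁.takeWhile (fun p => decide (h₁ < p.1))
            ++ (r₁.dropWhile (fun p => decide (h₁ < p.1)) ++ l₂) := by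
          rw [← List.append_assoc, List.takeWhile_append_dropWhile]
        rw [hsplit]
        have ih1 := pvLemS h₁ (r₁.takeWhile (fun p => decide (h₁ < p.1)))
            (r₁.dropWhile (fun p => decide (h₁ < p.1)) ++ l₂) (ind :: top :: srest) hrun hrest'
        rw [ih1]
        have hr' : ∀ p ∈ r₁.dropWhile (fun p => decide (h₁ < p.1)), ind < p.1 := by
          intro p hp
          exact hr1 p (List.dropWhile_sublist _ |>.mem hp)
        have ih2 := pvLemS ind (r₁.dropWhile (fun p => decide (h₁ < p.1))) l₂ (top :: srest) hr' h2
        rw [ih2]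
        rw [pvEmitB]
        simp only [show (r₁.takeWhile (fun p => decide (h₁ < p.1))).isEmpty = false by
              simpa using hrunE]
        simp
termination_by l₁.length
decreasing_by
  · simp
  · exact Nat.lt_succ_of_le (r₁.takeWhile_sublist _).length_le
  · exact Nat.lt_succ_of_le (r₁.length_dropWhile_le _)
  · simp
  · exact Nat.lt_succ_of_le (r₁.takeWhile_sublist _).length_le
  · exact Nat.lt_succ_of_le (r₁.length_dropWhile_le _)

-- At the top level (empty stack) A's loop produces B's rendering at depth 0.
theorem pvLemT (l : List (Int × String)) : pvLoopA l [] = pvEmitB l 0 := by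
  match l with
  | [] => rw [pvLoopA_nil, pvEmitB_nil, pvCloseA]
  | (h, t) :: r =>
    rw [pvLoopA_cons_nil, pvEmitB_cons]
    have hcont : (match r with | (ni, _) :: _ => decide (h < ni) | [] => false)
        = !(r.takeWhile (fun p => decide (h < p.1))).isEmpty := by
      cases r with
      | nil => simp
      | cons q qr =>
        obtain ⟨q1, q2⟩ := q
        by_cases hq : h < q1 <;> simp [hq]
    rw [hcont]
    by_cases hrunE : (r.takeWhile (fun p => decide (h < p.1))).isEmpty
    · have hdrop : r.dropWhile (fun p => decide (h < p.1)) = r := by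
        cases r with
        | nil => rfl
        | cons q qr =>
          obtain ⟨q1, q2⟩ := q
          rw [List.dropWhile_cons]
          by_cases hq : h < q1
          · simp [hq] at hrunE
          · simp [hq]
      rw [hrunE]
      simp only [Bool.not_true]
      rw [pvLemT r]
      simp [hdrop]
    · rw [show (r.takeWhile (fun p => decide (h < p.1))).isEmpty = false by simpa using hrunE]
      simp only [Bool.not_false, if_true]
      have hsplit : r = r.takeWhile (fun p => decide (h < p.1))
          ++ r.dropWhile (fun p => decide (h < p.1)) := (r.takeWhile_append_dropWhile ..).symm
      conv_lhs => rw [hsplit]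
      have hrun : ∀ p ∈ r.takeWhile (fun p => decide (h < p.1)), h < p.1 := by
        intro p hp
        have := List.mem_takeWhile_imp hp
        simpa using this
      have hrest' : ∀ p ∈ (r.dropWhile (fun p => decide (h < p.1))).head?, p.1 ≤ h := by
        intro p hp
        have := List.head?_dropWhile_not (fun p => decide (h < p.1)) r
        cases hd : r.dropWhile (fun p => decide (h < p.1)) with
        | nil => simp [hd] at hp
        | cons q qr =>
          rw [hd] at this hp
          simp at this hp
          subst hp; omega
      rw [pvLemS h (r.takeWhile (fun p => decide (h < p.1)))
            (r.dropWhile (fun p => decide (h < p.1))) [] hrun hrest']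
      rw [pvLemT (r.dropWhile (fun p => decide (h < p.1)))]
      simp
termination_by l.length
decreasing_by
  · simp
  · exact Nat.lt_succ_of_le (r.length_dropWhile_le _)

-- ===== VERDICT (by name: the statement is the Claim_ definition above) =====
theorem indented_to_braces_py_spec : Claim_equal_indented_to_braces_py := by
  intro text _
  unfold Spec_indented_to_braces_py indented_to_braces_py indented_to_braces_py_alt
  rw [← pvParseA_eq_filterMap]
  by_cases h1 : (PySem.Str.splitlines text).isEmpty
  · have : PySem.Str.splitlines text = [] := by simpa using h1
    simp [h1, this, pvParseA, pvEmitB_nil]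
    rfl
  · simp only [h1]
    by_cases h2 : (pvParseA (PySem.Str.splitlines text)).isEmpty
    · have : pvParseA (PySem.Str.splitlines text) = [] := by simpa using h2
      simp [this, pvEmitB_nil]
      rfl
    · rw [pvLemT]
      simp [h2]
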